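-- pv_equiv track=rewrite | github.com/maqboolahmed24/Vecells | tools/analysis/build_lifecycle_coordinator_rules.py | route_context
-- ===== SOURCE A (Python) =====
-- def split_semicolon(value: str) -> list[str]:
--     if not value:
--         return []
--     return [item.strip() for item in value.split(";") if item.strip()]
--
-- def ordered_unique(values: list[str]) -> list[str]:
--     seen: set[str] = set()
--     result: list[str] = []
--     for value in values:
--         if value and value not in seen:
--             seen.add(value)
--             result.append(value)
--     return result
--
-- def route_context(route_family_refs: list[str], route_rows_by_family: dict[str, list[dict[str, str]]]) -> dict[str, list[str]]:
--     rows: list[dict[str, str]] = []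
--     for route_family_ref in route_family_refs:
--         rows.extend(route_rows_by_family.get(route_family_ref, []))
--     return {
--         "routeScopeRequirementRefs": ordered_unique(
--             [row["route_scope_requirement_id"] for row in rows]
--         ),
--         "actingScopeTupleRefs": ordered_unique(
--             [row["sample_acting_scope_tuple_ref"] for row in rows if row["sample_acting_scope_tuple_ref"]]
--         ),
--         "audienceSurfaceRefs": ordered_unique(
--             sum((split_semicolon(row["audience_surface_refs"]) for row in rows), [])
--         ),
--         "runtimeBindingRefs": ordered_unique(
--             sum((split_semicolon(row["required_runtime_binding_refs"]) for row in rows), [])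
--         ),
--         "trustRefs": ordered_unique(
--             sum((split_semicolon(row["required_trust_refs"]) for row in rows), [])
--         ),
--         "purposeRefs": ordered_unique([row["purpose_of_use_ref"] for row in rows if row["purpose_of_use_ref"]]),
--     }
-- ===== SOURCE B (Python) =====
-- def route_context(route_family_refs: list[str], route_rows_by_family: dict[str, list[dict[str, str]]]) -> dict[str, list[str]]:
--     # One pass over the rows, carrying six (seen-set, ordered-result) pairs.
--     pairs = [(set(), []) for _ in range(6)]
--
--     def add(idx, value):
--         seen, out = pairs[idx]
--         if value and value not in seen:
--             seen.add(value)
--             out.append(value)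
--
--     for ref in route_family_refs:
--         for row in route_rows_by_family.get(ref, []):
--             add(0, row["route_scope_requirement_id"])
--             add(1, row["sample_acting_scope_tuple_ref"])
--             for field, idx in (("audience_surface_refs", 2),
--                                ("required_runtime_binding_refs", 3),
--                                ("required_trust_refs", 4)):
--                 for tok in row[field].split(";"):
--                     add(idx, tok.strip())
--             add(5, row["purpose_of_use_ref"])
--
--     return {
--         "routeScopeRequirementRefs": pairs[0][1],
--         "actingScopeTupleRefs": pairs[1][1],
--         "audienceSurfaceRefs": pairs[2][1],
--         "runtimeBindingRefs": pairs[3][1],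
--         "trustRefs": pairs[4][1],
--         "purposeRefs": pairs[5][1],
--     }
-- ===== Notes on version B (the rewrite author's own statement) =====
-- stated objective: alternative
-- what changed: Replaces the gather-rows-then-six-separate-dedup-passes structure by a single traversal of the rows that carries six (seen-set, result-list) accumulators, one per output field.
import Mathlib
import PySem

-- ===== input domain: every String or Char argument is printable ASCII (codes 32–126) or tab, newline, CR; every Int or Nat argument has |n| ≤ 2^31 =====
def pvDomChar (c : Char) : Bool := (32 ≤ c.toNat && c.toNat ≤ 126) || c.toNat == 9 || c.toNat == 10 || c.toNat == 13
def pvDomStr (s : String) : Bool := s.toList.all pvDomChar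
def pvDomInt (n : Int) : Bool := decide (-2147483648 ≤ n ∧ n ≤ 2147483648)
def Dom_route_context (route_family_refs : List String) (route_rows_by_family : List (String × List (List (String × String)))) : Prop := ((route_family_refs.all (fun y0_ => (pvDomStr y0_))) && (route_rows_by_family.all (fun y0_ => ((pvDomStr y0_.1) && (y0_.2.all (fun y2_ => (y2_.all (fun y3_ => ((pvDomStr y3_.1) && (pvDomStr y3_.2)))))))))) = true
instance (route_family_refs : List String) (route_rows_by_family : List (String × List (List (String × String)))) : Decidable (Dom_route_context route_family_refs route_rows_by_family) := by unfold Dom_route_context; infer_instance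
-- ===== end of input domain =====

-- B does the same aggregation in ONE traversal of the rows carrying six (seen, result) accumulators,
-- instead of gathering the rows and running six separate dedup passes over them.

-- shared trivial lookups (Python dict access; first match, convention of the type mapping)
def rowGet (row : List (String × String)) (k : String) : String :=
  ((row.find? (fun p => p.1 == k)).map (·.2)).getD ""

def famGet (d : List (String × List (List (String × String)))) (r : String) : List (List (String × String)) :=
  ((d.find? (fun p => p.1 == r)).map (·.2)).getD []

-- ===== PORT A =====
def splitSemicolonA (value : String) : List String :=
  if value = "" then []
  else (((PySem.Str.split? value ";").getD []).filter (fun item => PySem.Str.strip item != "")).map PySem.Str.strip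

def orderedUniqueA (values : List String) : List String :=
  (values.foldl
    (fun (st : PySem.Set String × List String) v =>
      if (v != "") && !(PySem.Set.contains st.1 v) then (PySem.Set.add st.1 v, st.2 ++ [v]) else st)
    (PySem.Set.empty, [])).2

def route_context (route_family_refs : List String) (route_rows_by_family : List (String × List (List (String × String)))) : List (String × List String) :=
  let rows : List (List (String × String)) :=
    route_family_refs.foldl (fun acc r => acc ++ famGet route_rows_by_family r) []
  [("routeScopeRequirementRefs",
      orderedUniqueA (rows.map (fun row => rowGet row "route_scope_requirement_id"))),
   ("actingScopeTupleRefs",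
      orderedUniqueA ((rows.filter (fun row => rowGet row "sample_acting_scope_tuple_ref" != "")).map
        (fun row => rowGet row "sample_acting_scope_tuple_ref"))),
   ("audienceSurfaceRefs",
      orderedUniqueA (rows.foldl (fun acc row => acc ++ splitSemicolonA (rowGet row "audience_surface_refs")) [])),
   ("runtimeBindingRefs",
      orderedUniqueA (rows.foldl (fun acc row => acc ++ splitSemicolonA (rowGet row "required_runtime_binding_refs")) [])),
   ("trustRefs",
      orderedUniqueA (rows.foldl (fun acc row => acc ++ splitSemicolonA (rowGet row "required_trust_refs")) [])),
   ("purposeRefs",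
      orderedUniqueA ((rows.filter (fun row => rowGet row "purpose_of_use_ref" != "")).map
        (fun row => rowGet row "purpose_of_use_ref")))]

-- ===== PORT B =====
-- one accumulator pair: (seen-set, ordered result)
def addTok (st : PySem.Set String × List String) (v : String) : PySem.Set String × List String :=
  if (v != "") && !(PySem.Set.contains st.1 v) then (PySem.Set.add st.1 v, st.2 ++ [v]) else st

def addSplit (st : PySem.Set String × List String) (v : String) : PySem.Set String × List String :=
  ((PySem.Str.split? v ";").getD []).foldl (fun st item => addTok st (PySem.Str.strip item)) st

abbrev P6 : Type := (PySem.Set String × List String) × (PySem.Set String × List String) ×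
  (PySem.Set String × List String) × (PySem.Set String × List String) ×
  (PySem.Set String × List String) × (PySem.Set String × List String)

def route_context_alt (route_family_refs : List String) (route_rows_by_family : List (String × List (List (String × String)))) : List (String × List String) :=
  let rows : List (List (String × String)) :=
    route_family_refs.flatMap (fun r => famGet route_rows_by_family r)
  let st : P6 := rows.foldl
    (fun (s : P6) row =>
      (addTok s.1 (rowGet row "route_scope_requirement_id"),
       addTok s.2.1 (rowGet row "sample_acting_scope_tuple_ref"),
       addSplit s.2.2.1 (rowGet row "audience_surface_refs"),
       addSplit s.2.2.2.1 (rowGet row "required_runtime_binding_refs"),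
       addSplit s.2.2.2.2.1 (rowGet row "required_trust_refs"),
       addTok s.2.2.2.2.2 (rowGet row "purpose_of_use_ref")))
    ((PySem.Set.empty, []), (PySem.Set.empty, []), (PySem.Set.empty, []),
     (PySem.Set.empty, []), (PySem.Set.empty, []), (PySem.Set.empty, []))
  [("routeScopeRequirementRefs", st.1.2),
   ("actingScopeTupleRefs", st.2.1.2),
   ("audienceSurfaceRefs", st.2.2.1.2),
   ("runtimeBindingRefs", st.2.2.2.1.2),
   ("trustRefs", st.2.2.2.2.1.2),
   ("purposeRefs", st.2.2.2.2.2.2)]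

-- ===== PRECONDITION & SPEC =====
-- Pre_ excludes exactly the inputs where Python A raises KeyError: some gathered row lacks one of the six field keys.
def Pre_route_context (route_family_refs : List String) (route_rows_by_family : List (String × List (List (String × String)))) : Prop :=
  (route_family_refs.all (fun r => (famGet route_rows_by_family r).all (fun row =>
    (["route_scope_requirement_id", "sample_acting_scope_tuple_ref", "audience_surface_refs",
      "required_runtime_binding_refs", "required_trust_refs", "purpose_of_use_ref"].all
      (fun k => row.any (fun p => p.1 == k)))))) = true
instance (route_family_refs : List String) (route_rows_by_family : List (String × List (List (String × String)))) : Decidable (Pre_route_context route_family_refs route_rows_by_family) := by unfold Pre_route_context; infer_instance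

def pvWitness_route_context : List String × (List (String × List (List (String × String)))) :=
  (["f"], [("f", [[("route_scope_requirement_id", "r1"), ("sample_acting_scope_tuple_ref", ""),
                   ("audience_surface_refs", "a; b"), ("required_runtime_binding_refs", ""),
                   ("required_trust_refs", "t"), ("purpose_of_use_ref", "p")]])])

def Spec_route_context (route_family_refs : List String) (route_rows_by_family : List (String × List (List (String × String)))) (out : List (String × List String)) : Prop := out = route_context_alt route_family_refs route_rows_by_family
instance (route_family_refs : List String) (route_rows_by_family : List (String × List (List (String × String)))) (out : List (String × List String)) : Decidable (Spec_route_context route_family_refs route_rows_by_family out) := by unfold Spec_route_context; infer_instance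

-- ===== CLAIM (what is proved, stated in full; the proofs are below) =====
def Claim_equal_route_context : Prop := ∀ (route_family_refs : List String) (route_rows_by_family : List (String × List (List (String × String)))), Dom_route_context route_family_refs route_rows_by_family → Pre_route_context route_family_refs route_rows_by_family → Spec_route_context route_family_refs route_rows_by_family (route_context route_family_refs route_rows_by_family)

-- ===== LEMMAS AND PROOFS =====

theorem orderedUniqueA_eq (values : List String) :
    orderedUniqueA values = (values.foldl addTok (PySem.Set.empty, [])).2 := rfl

theorem foldl_flatMap {α β γ : Type} (l : List α) (g : α → List β) (f : γ → β → γ) (init : γ) :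
    (l.flatMap g).foldl f init = l.foldl (fun st x => (g x).foldl f st) init := by
  induction l generalizing init with
  | nil => rfl
  | cons h t ih => simp [List.flatMap_cons, List.foldl_append, ih]

-- the two per-field traversals over one semicolon field coincide
theorem addTok_split (v : String) (st : PySem.Set String × List String) :
    (splitSemicolonA v).foldl addTok st = addSplit st v := by
  unfold splitSemicolonA addSplit
  by_cases hv : v = ""
  · subst hv; simp [PySem.Str.split?, PySem.Chars.split?, PySem.Chars.splitOn]
    rfl
  · simp only [if_neg hv, List.foldl_map, List.foldl_filter]
    apply PySem.List.foldl_congr_mem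
    intro acc x _
    by_cases h : PySem.Str.strip x != ""
    · simp [h]
    · simp [addTok, h]

theorem fold_map {α : Type} (rows : List α) (f : α → String) (init : PySem.Set String × List String) :
    (rows.map f).foldl addTok init = rows.foldl (fun st row => addTok st (f row)) init := by
  rw [List.foldl_map]

theorem fold_filter_map {α : Type} (rows : List α) (f : α → String) (init : PySem.Set String × List String) :
    ((rows.filter (fun row => f row != "")).map f).foldl addTok init =
      rows.foldl (fun st row => addTok st (f row)) init := by
  rw [List.foldl_map, List.foldl_filter]
  apply PySem.List.foldl_congr_mem
  intro acc x _
  by_cases h : f x != ""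
  · simp [h]
  · simp [addTok, h]

theorem fold_flat {α : Type} (rows : List α) (f : α → String) (init : PySem.Set String × List String) :
    (rows.flatMap (fun row => splitSemicolonA (f row))).foldl addTok init =
      rows.foldl (fun st row => addSplit st (f row)) init := by
  rw [foldl_flatMap]
  apply PySem.List.foldl_congr_mem
  intro acc x _
  exact addTok_split (f x) acc

-- ===== VERDICT (by name: the statement is the Claim_ definition above) =====
theorem route_context_spec : Claim_equal_route_context := by
  intro refs d _ _
  show route_context refs d = route_context_alt refs d
  simp only [route_context, route_context_alt, orderedUniqueA_eq]
  simp only [PySem.List.foldl_append_eq_flatMap, List.nil_append]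
  rw [fold_map, fold_filter_map, fold_filter_map, fold_flat, fold_flat, fold_flat]
  rw [PySem.List.foldl_prod_mk
        (f := fun s row => addTok s (rowGet row "route_scope_requirement_id"))
        (g := fun s row =>
          (addTok s.1 (rowGet row "sample_acting_scope_tuple_ref"),
           addSplit s.2.1 (rowGet row "audience_surface_refs"),
           addSplit s.2.2.1 (rowGet row "required_runtime_binding_refs"),
           addSplit s.2.2.2.1 (rowGet row "required_trust_refs"),
           addTok s.2.2.2.2 (rowGet row "purpose_of_use_ref"))),
      PySem.List.foldl_prod_mk
        (f := fun s row => addTok s (rowGet row "sample_acting_scope_tuple_ref"))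
        (g := fun s row =>
          (addSplit s.1 (rowGet row "audience_surface_refs"),
           addSplit s.2.1 (rowGet row "required_runtime_binding_refs"),
           addSplit s.2.2.1 (rowGet row "required_trust_refs"),
           addTok s.2.2.2 (rowGet row "purpose_of_use_ref"))),
      PySem.List.foldl_prod_mk
        (f := fun s row => addSplit s (rowGet row "audience_surface_refs"))
        (g := fun s row =>
          (addSplit s.1 (rowGet row "required_runtime_binding_refs"),
           addSplit s.2.1 (rowGet row "required_trust_refs"),
           addTok s.2.2 (rowGet row "purpose_of_use_ref"))),
      PySem.List.foldl_prod_mk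
        (f := fun s row => addSplit s (rowGet row "required_runtime_binding_refs"))
        (g := fun s row =>
          (addSplit s.1 (rowGet row "required_trust_refs"),
           addTok s.2 (rowGet row "purpose_of_use_ref"))),
      PySem.List.foldl_prod_mk
        (f := fun s row => addSplit s (rowGet row "required_trust_refs"))
        (g := fun s row => addTok s (rowGet row "purpose_of_use_ref"))]
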